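-- pv_equiv track=rewrite | github.com/nanako7z/roko-auto | roko/screen/matcher.py | _center_out_order
-- ===== SOURCE A (Python) =====
-- def _center_out_order(n: int) -> list[int]:
--     """Return indices 0..n-1 reordered from center outward."""
--     mid = n // 2
--     order = []
--     lo, hi = mid - 1, mid
--     while lo >= 0 or hi < n:
--         if hi < n:
--             order.append(hi)
--             hi += 1
--         if lo >= 0:
--             order.append(lo)
--             lo -= 1
--     return order
-- ===== SOURCE B (Python) =====
-- def _center_out_order(n: int) -> list[int]:
--     """Return indices 0..n-1 reordered from center outward."""
--     mid = n // 2
--     return sorted(range(n), key=lambda i: 2 * abs(i - mid) + (i >= mid))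
-- ===== Notes on version B (the rewrite author's own statement) =====
-- stated objective: idiomatic
-- what changed: Replaces the explicit two-pointer lo/hi expansion loop with a single sorted(range(n), key=...) call ordering indices by an encoded (distance-from-center, side) key.
import Mathlib
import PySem

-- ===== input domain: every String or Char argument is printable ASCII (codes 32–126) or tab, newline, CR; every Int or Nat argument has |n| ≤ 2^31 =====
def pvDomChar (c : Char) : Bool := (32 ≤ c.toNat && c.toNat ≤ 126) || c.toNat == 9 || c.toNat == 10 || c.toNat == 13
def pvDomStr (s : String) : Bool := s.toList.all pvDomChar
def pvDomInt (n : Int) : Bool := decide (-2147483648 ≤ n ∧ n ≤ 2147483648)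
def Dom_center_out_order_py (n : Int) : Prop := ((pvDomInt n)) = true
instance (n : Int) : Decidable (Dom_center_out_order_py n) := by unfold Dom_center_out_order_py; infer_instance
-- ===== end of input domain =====

-- B replaces A's two-pointer center-outward emission loop with a single sort of range(n)
-- by an encoded (distance from center, side) integer key; same return value, proved equal.

-- ===== PORT A =====
-- A's while loop: state (lo, hi, order); each iteration appends hi (if hi < n) then lo (if lo >= 0).
-- The fuel is exactly the number of remaining iterations (each step shrinks
-- (lo+1).toNat + (n-hi).toNat by at least 1); it only makes the loop total.
def centerLoopA (n : Int) : Nat → Int → Int → List Int → List Int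
  | 0, _, _, order => order
  | fuel + 1, lo, hi, order =>
    if lo ≥ 0 ∨ hi < n then
      centerLoopA n fuel (if lo ≥ 0 then lo - 1 else lo) (if hi < n then hi + 1 else hi)
        ((order ++ (if hi < n then [hi] else [])) ++ (if lo ≥ 0 then [lo] else []))
    else order

def center_out_order_py (n : Int) : List Int :=
  let mid := PySem.Int.floordiv n 2
  centerLoopA n (mid.toNat + (n - mid).toNat) (mid - 1) mid []

-- ===== PORT B =====
def center_out_order_py_alt (n : Int) : List Int :=
  let mid := PySem.Int.floordiv n 2
  PySem.List.sorted (PySem.List.pyRange 0 n)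
    (fun i => 2 * |i - mid| + (if i ≥ mid then 1 else 0))

-- ===== PRECONDITION & SPEC =====
def Spec_center_out_order_py (n : Int) (out : List Int) : Prop := out = center_out_order_py_alt n
instance (n : Int) (out : List Int) : Decidable (Spec_center_out_order_py n out) := by unfold Spec_center_out_order_py; infer_instance

-- ===== CLAIM (what is proved, stated in full; the proofs are below) =====
def Claim_equal_center_out_order_py : Prop := ∀ (n : Int), Dom_center_out_order_py n → Spec_center_out_order_py n (center_out_order_py n)

-- ===== LEMMAS AND PROOFS =====

theorem centerLoopA_acc (n : Int) : ∀ (fuel : Nat) (lo hi : Int) (order : List Int),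
    centerLoopA n fuel lo hi order = order ++ centerLoopA n fuel lo hi [] := by
  intro fuel
  induction fuel with
  | zero => intro lo hi order; simp [centerLoopA]
  | succ m ih =>
    intro lo hi order
    by_cases h : lo ≥ 0 ∨ hi < n
    · rw [centerLoopA, centerLoopA, if_pos h, if_pos h,
          ih _ _ ((order ++ _) ++ _), ih _ _ ((([] : List Int) ++ _) ++ _)]
      simp
    · rw [centerLoopA, centerLoopA, if_neg h, if_neg h]
      simp

theorem perm_two (R0 R1 : List Int) (a b : Int) :
    (b :: a :: (R0 ++ R1)).Perm ((R0 ++ [a]) ++ (b :: R1)) := by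
  have h1 : (b :: a :: (R0 ++ R1)).Perm (a :: b :: (R0 ++ R1)) := List.Perm.swap _ _ _
  have h2 : (b :: (R0 ++ R1)).Perm (R0 ++ b :: R1) := List.perm_middle.symm
  have h3 : (a :: (R0 ++ b :: R1)).Perm (R0 ++ a :: b :: R1) := List.perm_middle.symm
  have he : (R0 ++ [a]) ++ (b :: R1) = R0 ++ a :: b :: R1 := by simp
  rw [he]
  exact h1.trans ((h2.cons a).trans h3)

theorem centerLoopA_perm (n : Int) : ∀ (fuel : Nat) (lo hi : Int),
    (lo + 1).toNat + (n - hi).toNat ≤ fuel →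
    (centerLoopA n fuel lo hi []).Perm
      (PySem.List.pyRange 0 (lo + 1) ++ PySem.List.pyRange hi n) := by
  intro fuel
  induction fuel with
  | zero =>
    intro lo hi hm
    rw [PySem.List.pyRange_one_eq_nil (by omega), PySem.List.pyRange_one_eq_nil (by omega)]
    rfl
  | succ m ih =>
    intro lo hi hm
    by_cases h : lo ≥ 0 ∨ hi < n
    · rw [centerLoopA, if_pos h, centerLoopA_acc]
      by_cases hhi : hi < n <;> by_cases hlo : lo ≥ 0
      · -- both sides active
        simp only [if_pos hhi, if_pos hlo, List.nil_append, List.cons_append]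
        have IH := ih (lo - 1) (hi + 1) (by omega)
        rw [show lo - 1 + 1 = lo by ring] at IH
        rw [PySem.List.pyRange_one_cons (show hi < n from hhi),
            PySem.List.pyRange_one_append 0 lo (lo + 1) (by omega) (by omega),
            PySem.List.pyRange_one_cons (show lo < lo + 1 by omega),
            PySem.List.pyRange_one_eq_nil (show lo + 1 ≤ lo + 1 from le_rfl)]
        exact ((IH.cons lo).cons hi).trans (by simpa using perm_two _ _ lo hi)
      · -- only hi active
        simp only [if_pos hhi, if_neg hlo, List.nil_append, List.cons_append, List.append_nil]
        have IH := ih lo (hi + 1) (by omega)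
        rw [PySem.List.pyRange_one_cons (show hi < n from hhi)]
        exact (IH.cons hi).trans List.perm_middle.symm
      · -- only lo active
        simp only [if_neg hhi, if_pos hlo, List.nil_append, List.cons_append, List.append_nil]
        have IH := ih (lo - 1) hi (by omega)
        rw [show lo - 1 + 1 = lo by ring] at IH
        rw [PySem.List.pyRange_one_eq_nil (show n ≤ hi by omega)] at IH ⊢
        rw [PySem.List.pyRange_one_append 0 lo (lo + 1) (by omega) (by omega),
            PySem.List.pyRange_one_cons (show lo < lo + 1 by omega),
            PySem.List.pyRange_one_eq_nil (show lo + 1 ≤ lo + 1 from le_rfl)]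
        simp only [List.append_nil] at IH ⊢
        exact (IH.cons lo).trans (List.perm_append_singleton lo _).symm
      · omega
    · rw [centerLoopA, if_neg h,
          PySem.List.pyRange_one_eq_nil (by omega),
          PySem.List.pyRange_one_eq_nil (by omega)]
      rfl

theorem mem_centerLoopA {n : Int} {fuel : Nat} {lo hi x : Int}
    (hm : (lo + 1).toNat + (n - hi).toNat ≤ fuel)
    (hx : x ∈ centerLoopA n fuel lo hi []) :
    (0 ≤ x ∧ x ≤ lo) ∨ (hi ≤ x ∧ x < n) := by
  have := (centerLoopA_perm n fuel lo hi hm).mem_iff.mp hx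
  rcases List.mem_append.mp this with h | h
  · left; have := PySem.List.mem_pyRange_one.mp h; omega
  · right; exact PySem.List.mem_pyRange_one.mp h

theorem key_lb_lo {mid lo x : Int} (h : 0 ≤ x ∧ x ≤ lo) (hlo : lo < mid) :
    2 * (mid - lo) ≤ 2 * |x - mid| + (if x ≥ mid then 1 else 0) := by
  rcases abs_cases (x - mid) with ⟨h1, h2⟩ | ⟨h1, h2⟩ <;> split_ifs <;> omega

theorem key_lb_hi {mid hi x n : Int} (h : hi ≤ x ∧ x < n) (hhi : mid ≤ hi) :
    2 * (hi - mid) + 1 ≤ 2 * |x - mid| + (if x ≥ mid then 1 else 0) := by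
  rcases abs_cases (x - mid) with ⟨h1, h2⟩ | ⟨h1, h2⟩ <;> split_ifs <;> omega

theorem centerLoopA_pairwise (n mid : Int) : ∀ (fuel : Nat) (lo hi : Int),
    (lo + 1).toNat + (n - hi).toNat ≤ fuel →
    lo < mid → mid ≤ hi →
    (0 ≤ lo → hi < n → lo + hi = 2 * mid - 1) →
    (centerLoopA n fuel lo hi []).Pairwise
      (fun a b => (2 * |a - mid| + (if a ≥ mid then 1 else 0)) <
                  (2 * |b - mid| + (if b ≥ mid then 1 else 0))) := by
  intro fuel
  induction fuel with
  | zero =>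
    intro lo hi _ _ _ _
    exact List.Pairwise.nil
  | succ m ih =>
    intro lo hi hm hlo hhi hsum
    by_cases h : lo ≥ 0 ∨ hi < n
    · rw [centerLoopA, if_pos h, centerLoopA_acc]
      by_cases hh : hi < n <;> by_cases hl : lo ≥ 0
      · -- both active: emits hi, lo, then recurses
        have hs := hsum hl hh
        simp only [if_pos hh, if_pos hl, List.nil_append, List.cons_append]
        have IH := ih (lo - 1) (hi + 1) (by omega) (by omega) (by omega) (by omega)
        refine List.Pairwise.cons ?_ (List.Pairwise.cons ?_ IH)
        · intro x hx
          rcases List.mem_cons.mp hx with rfl | hx'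
          · have h1 : |x - mid| = mid - x := by rw [abs_of_nonpos (by omega)]; ring
            have h2 : |hi - mid| = hi - mid := abs_of_nonneg (by omega)
            split_ifs <;> omega
          · rcases mem_centerLoopA (by omega) hx' with hc | hc
            · have := key_lb_lo hc (show lo - 1 < mid by omega)
              have h2 : |hi - mid| = hi - mid := abs_of_nonneg (by omega)
              split_ifs at * <;> omega
            · have := key_lb_hi hc (show mid ≤ hi + 1 by omega)
              have h2 : |hi - mid| = hi - mid := abs_of_nonneg (by omega)
              split_ifs at * <;> omega
        · intro x hx
          have h1 : |lo - mid| = mid - lo := by rw [abs_of_nonpos (by omega)]; ring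
          rcases mem_centerLoopA (by omega) hx with hc | hc
          · have := key_lb_lo hc (show lo - 1 < mid by omega)
            split_ifs at * <;> omega
          · have := key_lb_hi hc (show mid ≤ hi + 1 by omega)
            split_ifs at * <;> omega
      · -- only hi active
        simp only [if_pos hh, if_neg hl, List.nil_append, List.cons_append, List.append_nil]
        have IH := ih lo (hi + 1) (by omega) (by omega) (by omega) (by omega)
        refine List.Pairwise.cons ?_ IH
        intro x hx
        have h2 : |hi - mid| = hi - mid := abs_of_nonneg (by omega)
        rcases mem_centerLoopA (by omega) hx with hc | hc
        · omega
        · have := key_lb_hi hc (show mid ≤ hi + 1 by omega)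
          split_ifs at * <;> omega
      · -- only lo active
        simp only [if_neg hh, if_pos hl, List.nil_append, List.cons_append, List.append_nil]
        have IH := ih (lo - 1) hi (by omega) (by omega) (by omega) (by omega)
        refine List.Pairwise.cons ?_ IH
        intro x hx
        have h1 : |lo - mid| = mid - lo := by rw [abs_of_nonpos (by omega)]; ring
        rcases mem_centerLoopA (by omega) hx with hc | hc
        · have := key_lb_lo hc (show lo - 1 < mid by omega)
          split_ifs at * <;> omega
        · omega
      · omega
    · rw [centerLoopA, if_neg h]
      exact List.Pairwise.nil

-- ===== VERDICT (by name: the statement is the Claim_ definition above) =====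
theorem center_out_order_py_spec : Claim_equal_center_out_order_py := by
  intro n _
  unfold Spec_center_out_order_py center_out_order_py center_out_order_py_alt
  set mid := PySem.Int.floordiv n 2 with hmid
  have hdm := PySem.Int.floordiv_mul_add_mod n 2
  have hm0 := PySem.Int.mod_nonneg (a := n) (b := 2) (by norm_num)
  have hm1 := PySem.Int.mod_lt (a := n) (b := 2) (by norm_num)
  rw [← hmid] at hdm
  refine (PySem.List.sorted_eq_of_perm_of_pairwise_lt _ _ _ ?_ ?_).symm
  · refine (centerLoopA_perm n _ (mid - 1) mid (by omega)).trans ?_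
    by_cases h : 0 ≤ n
    · have he : PySem.List.pyRange 0 n = PySem.List.pyRange 0 (mid - 1 + 1) ++ PySem.List.pyRange mid n := by
        have := PySem.List.pyRange_one_append 0 mid n (by omega) (by omega)
        simpa using this
      rw [he]
    · rw [PySem.List.pyRange_one_eq_nil (by omega), PySem.List.pyRange_one_eq_nil (by omega),
          PySem.List.pyRange_one_eq_nil (by omega)]
      rfl
  · exact centerLoopA_pairwise n mid _ (mid - 1) mid (by omega) (by omega) le_rfl (by omega)
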